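-- pv_equiv track=rewrite | github.com/BloomDlwlrma/osv_mp2_ml_gen | work/osvmp2/int_prescreen.py | combine_shells
-- ===== SOURCE A (Python) =====
-- def combine_shells(shell_slice):
--     #shell_slice = sorted(shell_slice, key=lambda s: (s[0], s[2]))
--     '''int_slice = []
--     for idx, si in enumerate(shell_slice):
--         if idx == 0:
--             slice_i = si
--             a0, a1, b0, b1 = si
--         else:
--             c0, c1, d0, d1 = si
--             if (c0 == a0):
--                 if d0 == b1:
--                     slice_i = [a0, a1, slice_i[2], d1]
--                 else:
--                     int_slice.append(slice_i)
--                     slice_i = si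
--             else:
--                 int_slice.append(slice_i)
--                 slice_i = si
--             a0, a1, b0, b1 = si
--         if idx == (len(shell_slice)-1):
--             int_slice.append(slice_i)
--     shell_slice = []
--     for idx, si in enumerate(int_slice):
--         if idx == 0:
--             slice_i = si
--             a0, a1, b0, b1 = si
--         else:
--             c0, c1, d0, d1 = si
--             if (d0 == b0):
--                 if (c0 == a1) and (b1 == d1):
--                     slice_i = [slice_i[0], c1, b0, b1]
--                 else:
--                     shell_slice.append(slice_i)
--                     slice_i = si
--             else:
--                 shell_slice.append(slice_i)
--                 slice_i = si
--             a0, a1, b0, b1 = si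
--         if idx == (len(int_slice)-1):
--             shell_slice.append(slice_i)'''
--
--     shell_com = []
--     b_list = []
--     a0_pre = shell_slice[0][0]
--     for idx, (a0, a1, b0, b1) in enumerate(shell_slice):
--         if a0 != a0_pre:
--             shell_com.append(b_list)
--             b_list = [[a0, a1, b0, b1]]
--         else:
--             if b_list == []:
--                 b_list.append([a0, a1, b0, b1])
--             else:
--                 if b0 == b_list[-1][-1]:
--                     b_list[-1][-1] = b1
--                 else:
--                     b_list.append([a0, a1, b0, b1])
--         if idx == len(shell_slice)-1:
--             shell_com.append(b_list)
--         a0_pre = a0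
--     idx_list = []
--     idx_i = []
--     for idx, shell_i in enumerate(shell_com):
--         b_list = []
--         for a0, a1, b0, b1 in shell_i:
--             b_list.extend([b0, b1])
--         if idx == 0:
--             idx_i.append(idx)
--         else:
--             if b_list == blist_pre:
--                 idx_i.append(idx)
--             else:
--                 idx_list.append(idx_i)
--                 idx_i = [idx]
--         if idx == len(shell_com)-1:
--             idx_list.append(idx_i)
--         blist_pre = b_list
--     shell_slice = []
--     for idx_i in idx_list:
--         a0, a1 = shell_com[idx_i[0]][0][0], shell_com[idx_i[-1]][0][1]
--         for ax0, ax1, b0, b1 in shell_com[idx_i[0]]: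
--             shell_slice.append([a0, a1, b0, b1])
--
--     return shell_slice
-- ===== SOURCE B (Python) =====
-- def combine_shells(shell_slice):
--     # One streaming state machine over the rows: the current group's merged
--     # intervals and the open run (first group, a0, a1, signature) are carried
--     # directly; no intermediate shell_com / idx_list lists are ever built.
--     def sig(ivs):
--         return [v for iv in ivs for v in iv[2:]]
--
--     out = []
--
--     def close_group(g, run):
--         s = sig(g)
--         if run is not None:
--             if run[3] == s:
--                 return (run[0], run[1], g[0][1], s)
--             f, ra0, ra1, _ = run
--             out.extend([ra0, ra1, iv[2], iv[3]] for iv in f)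
--         return (g, g[0][0], g[0][1], s)
--
--     run = None  # (first_group_intervals, run_a0, run_a1, run_sig)
--     cur = None  # merged intervals of the group currently being read
--     for a0, a1, b0, b1 in shell_slice:
--         if cur is not None and cur[0][0] == a0:
--             if cur[-1][3] == b0:
--                 cur[-1] = cur[-1][:3] + [b1]
--             else:
--                 cur.append([a0, a1, b0, b1])
--         else:
--             if cur is not None:
--                 run = close_group(cur, run)
--             cur = [[a0, a1, b0, b1]]
--     f, ra0, ra1, _ = close_group(cur, run)
--     out.extend([ra0, ra1, iv[2], iv[3]] for iv in f)
--     return out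
-- ===== Notes on version B (the rewrite author's own statement) =====
-- stated objective: alternative
-- what changed: B replaces A's three staged passes and their materialised intermediate lists (shell_com of groups, idx_list of index runs, then emission by indexing back into shell_com) with one streaming state machine over the raw rows that merges contiguous b-intervals into the open group and fuses runs of equal-signature groups on the fly.
import Mathlib
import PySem

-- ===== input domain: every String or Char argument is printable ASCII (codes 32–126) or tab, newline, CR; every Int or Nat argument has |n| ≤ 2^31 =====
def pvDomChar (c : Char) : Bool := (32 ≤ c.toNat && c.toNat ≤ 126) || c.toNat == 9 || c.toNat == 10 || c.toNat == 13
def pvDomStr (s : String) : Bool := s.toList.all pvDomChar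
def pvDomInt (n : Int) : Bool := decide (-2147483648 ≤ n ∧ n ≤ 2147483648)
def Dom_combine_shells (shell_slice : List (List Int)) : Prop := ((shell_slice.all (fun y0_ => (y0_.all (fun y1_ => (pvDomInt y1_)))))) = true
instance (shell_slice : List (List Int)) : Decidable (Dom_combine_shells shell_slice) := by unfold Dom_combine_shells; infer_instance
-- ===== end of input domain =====

-- B replaces A's three staged passes and their intermediate lists (shell_com,
-- idx_list, emission by indexing back into shell_com) with ONE streaming state
-- machine over the rows; neither program mutates its argument as the caller
-- sees it is rebound. Proved equal on Pre_ (nonempty input, rows of length 4).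

-- ===== PORT A =====
-- first loop: group rows by a0 (contiguous), merging contiguous b-intervals
def csP1Step (st : List (List (List Int)) × List (List Int) × Int) (row : List Int) :
    List (List (List Int)) × List (List Int) × Int :=
  match row with
  | [a0, a1, b0, b1] =>
    let sc := st.1; let bl := st.2.1; let a0p := st.2.2
    if a0 ≠ a0p then (sc ++ [bl], [[a0, a1, b0, b1]], a0)
    else if bl = [] then (sc, [[a0, a1, b0, b1]], a0)
    else if (bl.getLastD []).getLastD 0 = b0 then
      -- b_list[-1][-1] = b1
      (sc, bl.dropLast ++ [(bl.getLastD []).dropLast ++ [b1]], a0)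
    else (sc, bl ++ [[a0, a1, b0, b1]], a0)
  | _ => st   -- Python raises ValueError unpacking such a row; excluded by Pre_

def csPass1 (shell_slice : List (List Int)) : List (List (List Int)) :=
  -- a0_pre = shell_slice[0][0] raises IndexError on []; excluded by Pre_
  let a0p := (shell_slice.headD []).getD 0 0
  let st := shell_slice.foldl csP1Step ([], [], a0p)
  if shell_slice = [] then st.1 else st.1 ++ [st.2.1]   -- 'if idx == len-1: append'

-- b_list built from a group in the second loop (extend([b0, b1]) per row)
def csSigA (g : List (List Int)) : List Int :=
  g.flatMap (fun r => match r with | [_, _, b0, b1] => [b0, b1] | _ => [])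

-- second loop over enumerate(shell_com), state (idx_list, idx_i, blist_pre)
def csP2 (k : Nat) (gs : List (List (List Int))) (idx_list : List (List Nat))
    (idx_i : List Nat) (blist_pre : List Int) : List (List Nat) × List Nat :=
  match gs with
  | [] => (idx_list, idx_i)
  | g :: rest =>
    let b := csSigA g
    if k = 0 then csP2 (k + 1) rest idx_list (idx_i ++ [k]) b
    else if b = blist_pre then csP2 (k + 1) rest idx_list (idx_i ++ [k]) b
    else csP2 (k + 1) rest (idx_list ++ [idx_i]) [k] b

def csIdxList (gs : List (List (List Int))) : List (List Nat) :=
  let p := csP2 0 gs [] [] []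
  if gs = [] then p.1 else p.1 ++ [p.2]   -- 'if idx == len(shell_com)-1: append'

-- third loop body: emit shell_com[idx_i[0]]'s intervals with the run's a0/a1
def csEmitRun (gs : List (List (List Int))) (r : List Nat) : List (List Int) :=
  let a0 := ((gs.getD (r.headD 0) []).headD []).getD 0 0
  let a1 := ((gs.getD (r.getLastD 0) []).headD []).getD 1 0
  (gs.getD (r.headD 0) []).flatMap (fun row =>
    match row with | [_, _, b0, b1] => [[a0, a1, b0, b1]] | _ => [])

def combine_shells (shell_slice : List (List Int)) : List (List Int) :=
  let gs := csPass1 shell_slice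
  (csIdxList gs).foldl (fun out r => out ++ csEmitRun gs r) []

-- ===== PORT B =====
-- sig(ivs) = [v for iv in ivs for v in iv[2:]]
def bSig (ivs : List (List Int)) : List Int := ivs.flatMap (fun iv => iv.drop 2)

-- out.extend([ra0, ra1, iv[2], iv[3]] for iv in f)
def bFlush (ra0 ra1 : Int) (f : List (List Int)) : List (List Int) :=
  f.map (fun iv => [ra0, ra1, iv.getD 2 0, iv.getD 3 0])

-- close_group(g, run): merge g into the run or flush the run and start anew
def bClose (out : List (List Int)) (run : Option (List (List Int) × Int × Int × List Int))
    (g : List (List Int)) : List (List Int) × (List (List Int) × Int × Int × List Int) :=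
  let s := bSig g
  match run with
  | some (f, ra0, ra1, rs) =>
    if rs = s then (out, (f, ra0, (g.headD []).getD 1 0, s))
    else (out ++ bFlush ra0 ra1 f, (g, (g.headD []).getD 0 0, (g.headD []).getD 1 0, s))
  | none => (out, (g, (g.headD []).getD 0 0, (g.headD []).getD 1 0, s))

-- loop body: state (out, run, cur)
def bStep (st : List (List Int) × Option (List (List Int) × Int × Int × List Int)
      × Option (List (List Int))) (row : List Int) :
    List (List Int) × Option (List (List Int) × Int × Int × List Int)
      × Option (List (List Int)) :=
  match row with
  | [a0, a1, b0, b1] =>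
    match st.2.2 with
    | some c =>
      if (c.headD []).getD 0 0 = a0 then
        if (c.getLastD []).getD 3 0 = b0 then
          (st.1, st.2.1, some (c.dropLast ++ [(c.getLastD []).take 3 ++ [b1]]))
        else (st.1, st.2.1, some (c ++ [[a0, a1, b0, b1]]))
      else
        let p := bClose st.1 st.2.1 c
        (p.1, some p.2, some [[a0, a1, b0, b1]])
    | none => (st.1, st.2.1, some [[a0, a1, b0, b1]])
  | _ => st   -- Python raises ValueError unpacking such a row; excluded by Pre_

def combine_shells_alt (shell_slice : List (List Int)) : List (List Int) :=
  let st := shell_slice.foldl bStep ([], none, none)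
  match st.2.2 with
  | none => st.1   -- Python raises TypeError here (empty input); excluded by Pre_
  | some c =>
    let p := bClose st.1 st.2.1 c
    p.1 ++ bFlush p.2.2.1 p.2.2.2.1 p.2.1

-- ===== PRECONDITION & SPEC =====
-- Pre_ excludes exactly the inputs where A raises: the empty list (IndexError at
-- shell_slice[0][0]) and rows not of length 4 (ValueError on tuple unpacking).
def Pre_combine_shells (shell_slice : List (List Int)) : Prop :=
  shell_slice ≠ [] ∧ ∀ r ∈ shell_slice, r.length = 4
instance (shell_slice : List (List Int)) : Decidable (Pre_combine_shells shell_slice) := by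
  unfold Pre_combine_shells; infer_instance

def pvWitness_combine_shells : List (List Int) := [[0, 0, 0, 1], [0, 0, 1, 2], [1, 1, 0, 2]]

def Spec_combine_shells (shell_slice : List (List Int)) (out : List (List Int)) : Prop :=
  out = combine_shells_alt shell_slice
instance (shell_slice : List (List Int)) (out : List (List Int)) :
    Decidable (Spec_combine_shells shell_slice out) := by unfold Spec_combine_shells; infer_instance

-- ===== CLAIM (what is proved, stated in full; the proofs are below) =====
def Claim_equal_combine_shells : Prop := ∀ (shell_slice : List (List Int)),
  Dom_combine_shells shell_slice → Pre_combine_shells shell_slice →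
  Spec_combine_shells shell_slice (combine_shells shell_slice)

-- ===== LEMMAS AND PROOFS =====

-- a group is well-formed: nonempty and every interval has length 4
def pvGoodG (g : List (List Int)) : Prop := g ≠ [] ∧ ∀ e ∈ g, e.length = 4
def pvGood (gs : List (List (List Int))) : Prop := ∀ g ∈ gs, pvGoodG g

-- finish of B's fold, as a function of the whole state
def pvBFin (st : List (List Int) × Option (List (List Int) × Int × Int × List Int)
    × Option (List (List Int))) : List (List Int) :=
  match st.2.2 with
  | none => st.1
  | some c =>
    let p := bClose st.1 st.2.1 c
    p.1 ++ bFlush p.2.2.1 p.2.2.2.1 p.2.1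

-- B's group-level step: close one group into (out, run)
def altStep (st : List (List Int) × Option (List (List Int) × Int × Int × List Int))
    (g : List (List Int)) : List (List Int) × Option (List (List Int) × Int × Int × List Int) :=
  let p := bClose st.1 st.2 g
  (p.1, some p.2)

def pvFin (st : List (List Int) × Option (List (List Int) × Int × Int × List Int)) :
    List (List Int) :=
  match st.2 with
  | none => st.1
  | some (f, ra0, ra1, _) => st.1 ++ bFlush ra0 ra1 f

-- the list of groups obtained by continuing the open group c through rows
def pvGroups : List (List Int) → List (List Int) → List (List (List Int))
  | c, [] => [c]
  | c, row :: rest =>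
    match row with
    | [a0, a1, b0, b1] =>
      if (c.headD []).getD 0 0 = a0 then
        if (c.getLastD []).getD 3 0 = b0 then
          pvGroups (c.dropLast ++ [(c.getLastD []).take 3 ++ [b1]]) rest
        else pvGroups (c ++ [[a0, a1, b0, b1]]) rest
      else c :: pvGroups [[a0, a1, b0, b1]] rest
    | _ => pvGroups c rest

lemma pv_sig_eq (g : List (List Int)) (h : ∀ e ∈ g, e.length = 4) :
    csSigA g = bSig g := by
  induction g with
  | nil => rfl
  | cons e t ih =>
    have he : e.length = 4 := h e (by simp)
    match e, he with
    | [a, b, c, d], _ =>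
      simp [csSigA, bSig] at ih ⊢
      exact ih (fun x hx => h x (by simp [hx]))

-- fusion of B's row-level fold into the group-level fold over pvGroups
lemma pv_fuse (rows : List (List Int)) : ∀ out run c,
    pvBFin (rows.foldl bStep (out, run, some c))
      = pvFin ((pvGroups c rows).foldl altStep (out, run)) := by
  induction rows with
  | nil =>
    intro out run c
    rcases hp : bClose out run c with ⟨o, f, ra0, ra1, s⟩
    simp [pvBFin, pvGroups, pvFin, altStep, hp]
  | cons r t ih =>
    intro out run c
    simp only [List.foldl_cons]
    rcases r with _ | ⟨x0, _ | ⟨x1, _ | ⟨x2, _ | ⟨x3, _ | ⟨x4, rr⟩⟩⟩⟩⟩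
    · exact ih out run c
    · exact ih out run c
    · exact ih out run c
    · exact ih out run c
    case cons.cons.cons.cons.nil =>
      by_cases h1 : (c.headD []).getD 0 0 = x0
      · by_cases h2 : (c.getLastD []).getD 3 0 = x2
        · have hs : bStep (out, run, some c) [x0, x1, x2, x3]
              = (out, run, some (c.dropLast ++ [(c.getLastD []).take 3 ++ [x3]])) := by
            simp only [bStep]; rw [if_pos h1, if_pos h2]
          have hg : pvGroups c ([x0, x1, x2, x3] :: t)
              = pvGroups (c.dropLast ++ [(c.getLastD []).take 3 ++ [x3]]) t := by
            simp only [pvGroups]; rw [if_pos h1, if_pos h2]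
          rw [hs, hg]; exact ih out run _
        · have hs : bStep (out, run, some c) [x0, x1, x2, x3]
              = (out, run, some (c ++ [[x0, x1, x2, x3]])) := by
            simp only [bStep]; rw [if_pos h1, if_neg h2]
          have hg : pvGroups c ([x0, x1, x2, x3] :: t)
              = pvGroups (c ++ [[x0, x1, x2, x3]]) t := by
            simp only [pvGroups]; rw [if_pos h1, if_neg h2]
          rw [hs, hg]; exact ih out run _
      · have hs : bStep (out, run, some c) [x0, x1, x2, x3]
            = ((bClose out run c).1, some (bClose out run c).2, some [[x0, x1, x2, x3]]) := by
          simp only [bStep]; rw [if_neg h1]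
        have hg : pvGroups c ([x0, x1, x2, x3] :: t)
            = c :: pvGroups [[x0, x1, x2, x3]] t := by
          simp only [pvGroups]; rw [if_neg h1]
        rw [hs, hg, List.foldl_cons,
          show altStep (out, run) c = ((bClose out run c).1, some (bClose out run c).2) from rfl]
        exact ih _ _ _
    case cons.cons.cons.cons.cons =>
      exact ih out run c

lemma pv_len4_elim {l : List Int} (h : l.length = 4) : ∃ a b c d, l = [a, b, c, d] := by
  match l, h with | [a,b,c,d], _ => exact ⟨a, b, c, d, rfl⟩

lemma pv_goodG_last {bl : List (List Int)} (h : pvGoodG bl) : (bl.getLastD []).length = 4 := by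
  obtain ⟨hne, h4⟩ := h
  refine h4 _ ?_
  rw [List.getLastD_eq_getLast?, List.getLast?_eq_some_getLast hne, Option.getD_some]
  exact List.getLast_mem _

lemma pv_headD_concat {α : Type} (bl : List α) (x d : α) (h : bl ≠ []) :
    (bl ++ [x]).headD d = bl.headD d := by cases bl <;> simp_all

-- pvGroups tracks A's first pass: closed groups land in front, the open group last
lemma pv_groups_rel (rows : List (List Int)) :
    ∀ sc bl a0p, pvGood sc → pvGoodG bl → (bl.headD []).getD 0 0 = a0p →
    sc ++ pvGroups bl rows
        = (rows.foldl csP1Step (sc, bl, a0p)).1 ++ [(rows.foldl csP1Step (sc, bl, a0p)).2.1]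
      ∧ pvGood (rows.foldl csP1Step (sc, bl, a0p)).1
      ∧ pvGoodG (rows.foldl csP1Step (sc, bl, a0p)).2.1
      ∧ (((rows.foldl csP1Step (sc, bl, a0p)).2.1.headD []).getD 0 0
            = (rows.foldl csP1Step (sc, bl, a0p)).2.2) := by
  induction rows with
  | nil =>
    intro sc bl a0p hsc hbl hh
    exact ⟨by simp [pvGroups], hsc, hbl, hh⟩
  | cons r t ih =>
    intro sc bl a0p hsc hbl hh
    simp only [List.foldl_cons]
    rcases r with _ | ⟨x0, _ | ⟨x1, _ | ⟨x2, _ | ⟨x3, _ | ⟨x4, rr⟩⟩⟩⟩⟩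
    · simpa only [pvGroups] using ih sc bl a0p hsc hbl hh
    · simpa only [pvGroups] using ih sc bl a0p hsc hbl hh
    · simpa only [pvGroups] using ih sc bl a0p hsc hbl hh
    · simpa only [pvGroups] using ih sc bl a0p hsc hbl hh
    case cons.cons.cons.cons.nil =>
      have hblne := hbl.1
      have hlast4 : (bl.getLastD []).length = 4 := pv_goodG_last hbl
      obtain ⟨la, lb, lc, ld, hL⟩ := pv_len4_elim hlast4
      by_cases hne : x0 = a0p
      · -- same a0: the open group continues
        have hcond : (bl.headD []).getD 0 0 = x0 := by rw [hh, hne]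
        by_cases hmg : ld = x2
        · -- contiguous: merge into the last interval
          have hstepA : csP1Step (sc, bl, a0p) [x0, x1, x2, x3]
              = (sc, bl.dropLast ++ [[la, lb, lc, x3]], x0) := by
            simp only [csP1Step]
            rw [if_neg (by simp [hne]), if_neg hblne, if_pos (by rw [hL]; exact hmg)]
            rw [hL]
            rfl
          have hstepG : pvGroups bl ([x0, x1, x2, x3] :: t)
              = pvGroups (bl.dropLast ++ [[la, lb, lc, x3]]) t := by
            simp only [pvGroups]
            rw [if_pos hcond, if_pos (by rw [hL]; exact hmg), hL]
            simp
          rw [hstepA, hstepG]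
          refine ih _ _ _ hsc ⟨by simp, ?_⟩ ?_
          · intro e he
            rcases List.mem_append.1 he with h | h
            · exact hbl.2 e (List.dropLast_subset _ h)
            · simp at h; subst h; rfl
          · rcases bl with _ | ⟨y, ys⟩
            · exact absurd rfl hblne
            · rcases ys with _ | ⟨z, zs⟩
              · simp at hL
                subst hL; rw [hne]; exact hh
              · have : ((y :: z :: zs).dropLast ++ [[la, lb, lc, x3]]).headD [] = y := by
                  rw [pv_headD_concat _ _ _ (by simp)]; rfl
                rw [this, hne]; exact hh
        · -- not contiguous: append a new interval to the group
          have hstepA : csP1Step (sc, bl, a0p) [x0, x1, x2, x3]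
              = (sc, bl ++ [[x0, x1, x2, x3]], x0) := by
            simp only [csP1Step]
            rw [if_neg (by simp [hne]), if_neg hblne, if_neg (by rw [hL]; exact fun h => hmg h)]
          have hstepG : pvGroups bl ([x0, x1, x2, x3] :: t)
              = pvGroups (bl ++ [[x0, x1, x2, x3]]) t := by
            simp only [pvGroups]
            rw [if_pos hcond, if_neg (by rw [hL]; exact fun h => hmg h)]
          rw [hstepA, hstepG]
          refine ih _ _ _ hsc ⟨by simp, ?_⟩ ?_
          · intro e he
            rcases List.mem_append.1 he with h | h
            · exact hbl.2 e h
            · simp at h; subst h; rfl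
          · rw [pv_headD_concat _ _ _ hblne, hh, hne]
      · -- a0 changed: close the open group, start a new one
        have hstepA : csP1Step (sc, bl, a0p) [x0, x1, x2, x3]
            = (sc ++ [bl], [[x0, x1, x2, x3]], x0) := by
          simp only [csP1Step]; rw [if_pos hne]
        have hstepG : pvGroups bl ([x0, x1, x2, x3] :: t)
            = bl :: pvGroups [[x0, x1, x2, x3]] t := by
          simp only [pvGroups]
          rw [if_neg (by rw [hh]; exact fun h => hne h.symm)]
        rw [hstepA, hstepG]
        have := ih (sc ++ [bl]) [[x0, x1, x2, x3]] x0 ?_ ⟨by simp, ?_⟩ (by simp)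
        · refine ⟨?_, this.2⟩
          rw [← this.1]; simp
        · intro g hg
          rcases List.mem_append.1 hg with h | h
          · exact hsc g h
          · simp at h; subst h; exact hbl
        · intro e he; simp at he; subst he; rfl
    case cons.cons.cons.cons.cons =>
      simpa only [pvGroups] using ih sc bl a0p hsc hbl hh

-- the final value of B's group-level pass from a running state
def pvAltFin (gs : List (List (List Int))) (run : List (List Int) × Int × Int × List Int) :
    List (List Int) :=
  pvFin (gs.foldl altStep ([], some run))

lemma pv_emit_eq (a0 a1 : Int) (g : List (List Int)) (h : ∀ e ∈ g, e.length = 4) :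
    g.flatMap (fun row => match row with | [_, _, b0, b1] => [[a0, a1, b0, b1]] | _ => [])
      = bFlush a0 a1 g := by
  induction g with
  | nil => rfl
  | cons e t ih =>
    have he : e.length = 4 := h e (by simp)
    match e, he with
    | [a, b, c, d], _ =>
      simp [bFlush] at ih ⊢
      exact ih (fun x hx => h x (by simp [hx]))

-- idx_list accumulator of csP2 is only ever appended to
lemma pv_p2_acc (gs : List (List (List Int))) :
    ∀ k il1 il2 ii b, csP2 k gs (il1 ++ il2) ii b
      = (il1 ++ (csP2 k gs il2 ii b).1, (csP2 k gs il2 ii b).2) := by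
  induction gs with
  | nil => intro k il1 il2 ii b; rfl
  | cons g rest ih =>
    intro k il1 il2 ii b
    simp only [csP2]
    split_ifs with h1 h2
    · exact ih _ _ _ _ _
    · exact ih _ _ _ _ _
    · rw [show (il1 ++ il2) ++ [ii] = il1 ++ (il2 ++ [ii]) by simp]
      exact ih _ _ _ _ _

-- the out component of bClose is only ever appended to
lemma pv_bClose_acc (o : List (List Int)) (run : Option (List (List Int) × Int × Int × List Int))
    (g : List (List Int)) :
    bClose o run g = (o ++ (bClose [] run g).1, (bClose [] run g).2) := by
  cases run with
  | none => simp [bClose]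
  | some r =>
    obtain ⟨f, ra0, ra1, rs⟩ := r
    simp only [bClose]
    split_ifs <;> simp

-- out accumulator of the group-level fold is only ever appended to
lemma pv_alt_acc (gs : List (List (List Int))) :
    ∀ o run, gs.foldl altStep (o, run)
      = (o ++ (gs.foldl altStep ([], run)).1, (gs.foldl altStep ([], run)).2) := by
  induction gs with
  | nil => intro o run; simp
  | cons g rest ih =>
    intro o run
    simp only [List.foldl_cons, altStep]
    rw [pv_bClose_acc o run g]
    rw [ih (o ++ (bClose [] run g).1) _, ih ((bClose [] run g).1) _]
    simp

lemma pv_altFin_cons_cont (g : List (List Int)) (rest' : List (List (List Int)))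
    (rf : List (List Int)) (ra0 ra1 : Int) (rs : List Int) (h : bSig g = rs) :
    pvAltFin (g :: rest') (rf, ra0, ra1, rs)
      = pvAltFin rest' (rf, ra0, (g.headD []).getD 1 0, rs) := by
  simp only [pvAltFin, List.foldl_cons, altStep, bClose]
  rw [if_pos h.symm, h]

lemma pv_fin_acc (o : List (List Int))
    (st : List (List Int) × Option (List (List Int) × Int × Int × List Int)) :
    pvFin (o ++ st.1, st.2) = o ++ pvFin st := by
  rcases st with ⟨s1, _ | ⟨f, a, b, s⟩⟩ <;> simp [pvFin]

lemma pv_altFin_cons_flush (g : List (List Int)) (rest' : List (List (List Int)))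
    (rf : List (List Int)) (ra0 ra1 : Int) (rs : List Int) (h : ¬ bSig g = rs) :
    pvAltFin (g :: rest') (rf, ra0, ra1, rs)
      = bFlush ra0 ra1 rf
        ++ pvAltFin rest' (g, (g.headD []).getD 0 0, (g.headD []).getD 1 0, bSig g) := by
  simp only [pvAltFin, List.foldl_cons, altStep, bClose]
  rw [if_neg (fun hx => h hx.symm)]
  simp only [List.nil_append]
  rw [pv_alt_acc rest' (bFlush ra0 ra1 rf) _]
  exact pv_fin_acc _ _

lemma pv_range_getLastD : ∀ (n j d : ℕ), (List.range' j (n + 1)).getLastD d = j + n := by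
  intro n
  induction n with
  | zero => intro j d; rfl
  | succ m ih =>
    intro j d
    rw [List.range'_succ, List.getLastD_cons, ih]
    omega

lemma pv_getD_of_drop {gsall : List (List (List Int))} {k : ℕ} {g : List (List Int)}
    {t : List (List (List Int))} (h : gsall.drop k = g :: t) : gsall.getD k [] = g := by
  have h0 := List.getElem?_drop (xs := gsall) (i := k) (j := 0)
  rw [List.getD_eq_getElem?_getD]
  simp [h] at h0
  simp [← h0]

lemma pv_good_getD {gsall : List (List (List Int))} (hG : pvGood gsall) {k : ℕ}
    (hk : k < gsall.length) : pvGoodG (gsall.getD k []) := by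
  rw [List.getD_eq_getElem gsall [] hk]
  exact hG _ (List.getElem_mem hk)

lemma pv_emit_run (gsall : List (List (List Int))) (hG : pvGood gsall) (j k : ℕ)
    (hj : j < k) (hk : k ≤ gsall.length) :
    csEmitRun gsall (List.range' j (k - j))
      = bFlush (((gsall.getD j []).headD []).getD 0 0)
          (((gsall.getD (k - 1) []).headD []).getD 1 0) (gsall.getD j []) := by
  obtain ⟨m, hm⟩ : ∃ m, k - j = m + 1 := ⟨k - j - 1, by omega⟩
  have hhead : (List.range' j (k - j)).headD 0 = j := by rw [hm, List.range'_succ]; rfl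
  have hlastd : (List.range' j (k - j)).getLastD 0 = k - 1 := by
    rw [hm, pv_range_getLastD]; omega
  unfold csEmitRun
  rw [hhead, hlastd]
  exact pv_emit_eq _ _ _ (pv_good_getD hG (by omega)).2

-- key lemma: A's passes 2+3 from mid-state = B's group-level pass from matching run state
lemma pv_key (gsall : List (List (List Int))) (hG : pvGood gsall) :
    ∀ rest k j, rest = gsall.drop k → j < k → k ≤ gsall.length →
    (let p := csP2 k rest [] (List.range' j (k - j)) (bSig (gsall.getD j []));
     (p.1 ++ [p.2]).flatMap (csEmitRun gsall))
      = pvAltFin rest (gsall.getD j [], ((gsall.getD j []).headD []).getD 0 0,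
          ((gsall.getD (k - 1) []).headD []).getD 1 0, bSig (gsall.getD j [])) := by
  intro rest
  induction rest with
  | nil =>
    intro k j hdrop hj hk
    simp only [csP2, pvAltFin, pvFin, List.foldl_nil, List.nil_append, List.flatMap_cons,
      List.flatMap_nil, List.append_nil]
    exact pv_emit_run gsall hG j k hj hk
  | cons g rest' ih =>
    intro k j hdrop hj hk
    have hkne : k ≠ 0 := by omega
    have hdne : gsall.drop k ≠ [] := by rw [← hdrop]; simp
    have hklt : k < gsall.length := by
      rcases Nat.lt_or_ge k gsall.length with h | h
      · exact h
      · exact absurd (List.drop_eq_nil_of_le h) hdne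
    have hg : gsall.getD k [] = g := pv_getD_of_drop hdrop.symm
    have hrest' : rest' = gsall.drop (k + 1) := by
      rw [← List.tail_drop, ← hdrop]
      rfl
    have hGg : pvGoodG g := hg ▸ pv_good_getD hG hklt
    simp only [csP2, if_neg hkne]
    by_cases hsig : bSig g = bSig (gsall.getD j [])
    · -- run continues
      have hsigA : csSigA g = bSig (gsall.getD j []) := by rw [pv_sig_eq g hGg.2, hsig]
      rw [if_pos hsigA, hsigA]
      have hidx : List.range' j (k - j) ++ [k] = List.range' j (k + 1 - j) := by
        have h1 : k + 1 - j = (k - j) + 1 := by omega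
        rw [h1, List.range'_1_concat]
        have : j + (k - j) = k := by omega
        rw [this]
      rw [hidx, pv_altFin_cons_cont g rest' _ _ _ _ hsig]
      have := ih (k + 1) j hrest' (by omega) (by omega)
      simp only at this
      rw [this]
      have hk1 : k + 1 - 1 = k := by omega
      rw [hk1, hg]
    · -- run flushes
      have hsigA : ¬ (csSigA g = bSig (gsall.getD j [])) := by
        rw [pv_sig_eq g hGg.2]; exact hsig
      rw [if_neg hsigA]
      have hacc := pv_p2_acc rest' (k + 1) [List.range' j (k - j)] [] [k] (csSigA g)
      simp only [List.nil_append, List.append_nil] at hacc ⊢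
      rw [hacc]
      rw [pv_altFin_cons_flush g rest' _ _ _ _ hsig]
      have hsgk : csSigA g = bSig (gsall.getD k []) := by rw [pv_sig_eq g hGg.2, hg]
      have hrk : ([k] : List ℕ) = List.range' k (k + 1 - k) := by
        have : k + 1 - k = 1 := by omega
        rw [this]; rfl
      rw [hsgk, hrk]
      have := ih (k + 1) k hrest' (by omega) (by omega)
      simp only at this
      simp only [List.flatMap_append, List.flatMap_cons, List.flatMap_nil,
        List.append_nil, Nat.add_sub_cancel] at this ⊢
      rw [hg] at this ⊢
      rw [List.append_assoc, this, pv_emit_run gsall hG j k hj (le_of_lt hklt)]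

-- ===== VERDICT (by name: the statement is the Claim_ definition above) =====
theorem combine_shells_spec : Claim_equal_combine_shells := by
  intro ss _ hpre
  obtain ⟨hne, h4⟩ := hpre
  show combine_shells ss = combine_shells_alt ss
  rcases ss with _ | ⟨r, t⟩
  · exact absurd rfl hne
  obtain ⟨a0, a1, b0, b1, hr⟩ := pv_len4_elim (h4 r (by simp))
  subst hr
  -- relate pvGroups to A's first pass
  have hrel := pv_groups_rel t [] [[a0, a1, b0, b1]] a0 (by intro g hg; simp at hg)
    ⟨by simp, by intro e he; simp at he; subst he; rfl⟩ rfl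
  have hstepA0 : csP1Step ([], [], a0) [a0, a1, b0, b1] = ([], [[a0, a1, b0, b1]], a0) := by
    simp only [csP1Step]
    rw [if_neg (by simp)]
    simp
  have hA : csPass1 ([a0, a1, b0, b1] :: t)
      = (t.foldl csP1Step ([], [[a0, a1, b0, b1]], a0)).1
        ++ [(t.foldl csP1Step ([], [[a0, a1, b0, b1]], a0)).2.1] := by
    simp only [csPass1, List.foldl_cons, if_neg (by simp : ¬([a0, a1, b0, b1] :: t = []))]
    rw [show ((([a0, a1, b0, b1] :: t).headD []).getD 0 0) = a0 from rfl, hstepA0]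
  have hGroups : pvGroups [[a0, a1, b0, b1]] t = csPass1 ([a0, a1, b0, b1] :: t) := by
    rw [hA, ← hrel.1]; simp
  have hGood : pvGood (csPass1 ([a0, a1, b0, b1] :: t)) := by
    rw [hA]
    intro g hg
    rcases List.mem_append.1 hg with h | h
    · exact hrel.2.1 g h
    · simp at h; subst h; exact hrel.2.2.1
  have hnegs : csPass1 ([a0, a1, b0, b1] :: t) ≠ [] := by rw [hA]; simp
  -- B's single pass equals the group-level pass over csPass1
  have hBeq : combine_shells_alt ([a0, a1, b0, b1] :: t)
      = pvFin ((csPass1 ([a0, a1, b0, b1] :: t)).foldl altStep ([], none)) := by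
    have h0 : combine_shells_alt ([a0, a1, b0, b1] :: t)
        = pvBFin (t.foldl bStep ([], none, some [[a0, a1, b0, b1]])) := rfl
    rw [h0, pv_fuse t [] none [[a0, a1, b0, b1]], hGroups]
  rcases hgse : csPass1 ([a0, a1, b0, b1] :: t) with _ | ⟨g0, gs'⟩
  · exact absurd hgse hnegs
  rw [hgse] at hGood
  have hg0 : pvGoodG g0 := hGood g0 (by simp)
  have hAeq : combine_shells ([a0, a1, b0, b1] :: t)
      = (csIdxList (g0 :: gs')).foldl (fun out r => out ++ csEmitRun (g0 :: gs') r) [] := by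
    simp only [combine_shells, hgse]
  have hidx : csIdxList (g0 :: gs')
      = (csP2 1 gs' [] [0] (csSigA g0)).1 ++ [(csP2 1 gs' [] [0] (csSigA g0)).2] := by
    simp only [csIdxList, csP2, if_neg (by simp : ¬(g0 :: gs' = [])),
      List.nil_append]
    simp
  rw [hAeq, hBeq, hgse, hidx, PySem.List.foldl_append_eq_flatMap]
  have hkey := pv_key (g0 :: gs') hGood gs' 1 0 rfl (by omega) (by simp)
  simp only at hkey
  have hsg : csSigA g0 = bSig g0 := pv_sig_eq g0 hg0.2
  rw [hsg]
  have hr01 : (List.range' 0 1 : List ℕ) = [0] := rfl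
  rw [hr01] at hkey
  have hgd : ((g0 :: gs').getD 0 []) = g0 := rfl
  rw [hgd] at hkey
  rw [hkey]
  rfl
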